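-- pv_equiv track=rewrite | github.com/donald-f-ferguson/e1006s18 | CodeSamples/bettors_fallacy/Code/simulator/simulator_core.py | failure_streak_lengths
-- ===== SOURCE A (Python) =====
-- def failure_streak_lengths(event_stream):
--     result = []
--     on_a_streak = False;
--     count = len(event_stream)
--
--     on_a_streak = False
--     current_fail_streak = 0
--
--     for i in range(0,count):
--         current_event = event_stream[i]
--
--         if current_event == 0:
--             if on_a_streak == False:
--                 on_a_streak = True
--                 current_fail_streak = 1
--             else:
--                 current_fail_streak = current_fail_streak + 1
--         else:
--             if on_a_streak == True:
--                 on_a_streak = False;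
--                 result.append(current_fail_streak)
--                 current_fail_streak = 0
--     else:
--         if on_a_streak == True:
--             result.append(current_fail_streak)
--
--     return result
-- ===== SOURCE B (Python) =====
-- def failure_streak_lengths(event_stream):
--     # Run-scanning: find each maximal run of zeros with an inner scan and
--     # record its length; no streak flag or trailing flush needed.
--     lengths = []
--     n = len(event_stream)
--     i = 0
--     while i < n:
--         if event_stream[i] == 0:
--             j = i
--             while j < n and event_stream[j] == 0:
--                 j += 1
--             lengths.append(j - i)
--             i = j
--         else:
--             i += 1
--     return lengths
-- ===== Notes on version B (the rewrite author's own statement) =====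
-- stated objective: simpler
-- what changed: Replaces the flag/counter state machine with a trailing flush by a direct run-scanner: at each zero an inner scan finds the end of the maximal zero run and its length is appended, so no streak flag or post-loop flush exists.
import Mathlib
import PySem

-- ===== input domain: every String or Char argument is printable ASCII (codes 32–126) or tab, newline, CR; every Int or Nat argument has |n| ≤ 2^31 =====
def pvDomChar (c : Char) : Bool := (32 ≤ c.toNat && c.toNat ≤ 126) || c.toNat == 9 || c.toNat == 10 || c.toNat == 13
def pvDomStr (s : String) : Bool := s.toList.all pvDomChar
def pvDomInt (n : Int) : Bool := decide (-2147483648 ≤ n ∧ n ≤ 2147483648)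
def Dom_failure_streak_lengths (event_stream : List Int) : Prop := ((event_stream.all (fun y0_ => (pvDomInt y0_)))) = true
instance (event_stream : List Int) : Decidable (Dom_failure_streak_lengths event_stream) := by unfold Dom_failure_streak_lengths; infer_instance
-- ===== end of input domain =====

-- B replaces A's flag/counter state machine (with trailing flush) by a direct
-- run-scanner that measures each maximal zero run where it starts; simpler, same cost.

-- ===== PORT A =====
-- one loop iteration: state is (result, on_a_streak, current_fail_streak)
def aStep (st : List Int × Bool × Int) (current_event : Int) : List Int × Bool × Int :=
  if current_event == 0 then
    if st.2.1 == false then (st.1, true, 1)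
    else (st.1, st.2.1, st.2.2 + 1)
  else
    if st.2.1 == true then (st.1 ++ [st.2.2], false, 0)
    else st

def failure_streak_lengths (event_stream : List Int) : List Int :=
  let st := event_stream.foldl aStep ([], false, 0)
  if st.2.1 == true then st.1 ++ [st.2.2] else st.1

-- ===== PORT B =====
-- run-scanner: on a zero, measure the rest of the maximal zero run and skip it
def altGo (l : List Int) : List Int :=
  match l with
  | [] => []
  | x :: xs =>
    if x == 0 then
      (((xs.takeWhile (fun y => y == 0)).length : Int) + 1)
        :: altGo (xs.dropWhile (fun y => y == 0))
    else altGo xs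
termination_by l.length
decreasing_by
  · have := List.length_dropWhile_le (fun (y : Int) => y == 0) xs; simp; omega
  · simp

def failure_streak_lengths_alt (event_stream : List Int) : List Int :=
  altGo event_stream

-- ===== PRECONDITION & SPEC =====
def Spec_failure_streak_lengths (event_stream : List Int) (out : List Int) : Prop := out = failure_streak_lengths_alt event_stream
instance (event_stream : List Int) (out : List Int) : Decidable (Spec_failure_streak_lengths event_stream out) := by unfold Spec_failure_streak_lengths; infer_instance

-- ===== CLAIM (what is proved, stated in full; the proofs are below) =====
def Claim_equal_failure_streak_lengths : Prop := ∀ (event_stream : List Int), Dom_failure_streak_lengths event_stream → Spec_failure_streak_lengths event_stream (failure_streak_lengths event_stream)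

-- ===== LEMMAS AND PROOFS =====

def aFinal (st : List Int × Bool × Int) : List Int :=
  if st.2.1 == true then st.1 ++ [st.2.2] else st.1

-- combined loop invariant for A's fold, off-streak and on-streak states at once
theorem aFold_char (l : List Int) :
    (∀ res c, aFinal (l.foldl aStep (res, false, c)) = res ++ altGo l) ∧
    (∀ res c, aFinal (l.foldl aStep (res, true, c)) =
        res ++ (c + ((l.takeWhile (fun y => y == 0)).length : Int))
            :: altGo (l.dropWhile (fun y => y == 0))) := by
  induction l with
  | nil => simp [aFinal, altGo]
  | cons x xs ih =>
    refine ⟨fun res c => ?_, fun res c => ?_⟩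
    · by_cases hx : x = 0
      · subst hx
        rw [List.foldl_cons, show aStep (res, false, c) 0 = (res, true, 1) from rfl, ih.2]
        simp [altGo, add_comm]
      · have hs : aStep (res, false, c) x = (res, false, c) := by simp [aStep, hx]
        rw [List.foldl_cons, hs, ih.1]
        simp [altGo, hx]
    · by_cases hx : x = 0
      · subst hx
        rw [List.foldl_cons, show aStep (res, true, c) 0 = (res, true, c + 1) from rfl, ih.2]
        have hz : (c + 1) + ((xs.takeWhile (fun y => y == 0)).length : Int)
            = c + (((0 : Int) :: xs).takeWhile (fun y => y == 0)).length := by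
          simp; ring
        rw [hz]
        simp
      · have hs : aStep (res, true, c) x = (res ++ [c], false, 0) := by simp [aStep, hx]
        rw [List.foldl_cons, hs, ih.1]
        simp [hx, altGo]

-- ===== VERDICT (by name: the statement is the Claim_ definition above) =====
theorem failure_streak_lengths_spec : Claim_equal_failure_streak_lengths := by
  intro l _
  show failure_streak_lengths l = failure_streak_lengths_alt l
  have h := (aFold_char l).1 [] 0
  simpa [failure_streak_lengths, failure_streak_lengths_alt, aFinal] using h
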